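-- pv_equiv track=rewrite | github.com/2023-ssafy-study/Problem-Solving | wonkyoung/BOJ/20058_마법사_상어와_파이어스톰.py | find_sum_cnt
-- ===== SOURCE A (Python) =====
-- def find_sum_cnt(area, M):
--     from collections import deque
--     max_cnt = total = 0
--     visited = [[False] * M for _ in range(M)]
--     q = deque()
--     for i in range(M):
--         for j in range(M):
--             if area[i][j] and not visited[i][j]:
--                 total += area[i][j]
--                 q.append((i, j))
--                 visited[i][j] = True
--                 cnt = 1
--                 while q:
--                     y, x = q.popleft()
--                     for dy, dx in (-1, 0), (0, -1), (1, 0), (0, 1):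
--                         ny, nx = y+dy, x+dx
--                         if 0 <= ny < M and 0 <= nx < M:
--                             if area[ny][nx] and not visited[ny][nx]:
--                                 visited[ny][nx] = True
--                                 cnt += 1
--                                 q.append((ny, nx))
--                                 total += area[ny][nx]
--                 if cnt > max_cnt:
--                     max_cnt = cnt
--     return total, max_cnt
-- ===== SOURCE B (Python) =====
-- def find_sum_cnt(area, M):
--     # Total: A adds every nonzero cell exactly once and zeros add nothing,
--     # so the total is the plain sum of the M x M subgrid.
--     total = sum(area[i][j] for i in range(M) for j in range(M))
--     seen = set()
--     max_cnt = 0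
--     for i in range(M):
--         for j in range(M):
--             if area[i][j] and (i, j) not in seen:
--                 comp = {(i, j)}
--                 frontier = {(i, j)}
--                 while frontier:
--                     frontier = {(y + dy, x + dx)
--                                 for (y, x) in frontier
--                                 for dy, dx in ((-1, 0), (0, -1), (1, 0), (0, 1))
--                                 if 0 <= y + dy < M and 0 <= x + dx < M
--                                 and area[y + dy][x + dx]
--                                 and (y + dy, x + dx) not in comp}
--                     comp |= frontier
--                 seen |= comp
--                 max_cnt = max(max_cnt, len(comp))
--     return total, max_cnt
-- ===== Notes on version B (the rewrite author's own statement) =====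
-- stated objective: alternative
-- what changed: B computes the total as a closed-form sum of the whole M×M subgrid instead of accumulating it cell by cell during traversal, and measures each component by level-synchronous set saturation — repeatedly replacing the frontier set by its fresh in-bounds nonzero neighbours and unioning it into the component, taking len(comp) at the end — instead of A's per-cell BFS deque with running cnt/total counters.
import Mathlib
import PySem

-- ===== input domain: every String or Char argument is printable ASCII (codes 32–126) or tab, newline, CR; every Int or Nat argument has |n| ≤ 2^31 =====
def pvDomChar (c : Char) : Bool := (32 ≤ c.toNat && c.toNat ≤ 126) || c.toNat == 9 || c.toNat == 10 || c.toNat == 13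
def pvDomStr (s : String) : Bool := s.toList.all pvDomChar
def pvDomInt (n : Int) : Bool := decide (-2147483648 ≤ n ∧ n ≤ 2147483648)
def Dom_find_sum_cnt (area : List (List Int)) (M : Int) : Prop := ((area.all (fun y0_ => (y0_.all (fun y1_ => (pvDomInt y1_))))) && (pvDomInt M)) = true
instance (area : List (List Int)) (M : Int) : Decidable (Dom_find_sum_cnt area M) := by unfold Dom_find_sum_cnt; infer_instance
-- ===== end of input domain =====

-- B replaces A's per-cell BFS deque with running cnt/total counters by level-synchronous
-- frontier-set saturation (component = saturated set, size = its length) and a direct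
-- closed-form sum of the M×M subgrid for the total; objective: alternative (same cost).

-- ===== shared grid helpers (used by both ports) =====

-- area[i][j]; every access is in range under Pre_find_sum_cnt (getD default never used there)
def pvAt (area : List (List Int)) (i j : Int) : Int := (area.getD i.toNat []).getD j.toNat 0

-- range(M) as Ints
def pvRng (M : Int) : List Int := PySem.List.pyRange 0 M 1

-- the M×M cells in row-major order
def pvCells (M : Int) : List (Int × Int) := (pvRng M).flatMap (fun i => (pvRng M).map (fun j => (i, j)))

-- the four neighbour offsets (-1,0),(0,-1),(1,0),(0,1) applied to c
def pvNbrs (c : Int × Int) : List (Int × Int) := [(c.1 - 1, c.2), (c.1, c.2 - 1), (c.1 + 1, c.2), (c.1, c.2 + 1)]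

-- 0 <= y < M and 0 <= x < M
abbrev pvInB (M : Int) (c : Int × Int) : Prop := 0 ≤ c.1 ∧ c.1 < M ∧ 0 ≤ c.2 ∧ c.2 < M

-- in bounds and nonzero (a cell the flood fill may enter)
abbrev pvGood (area : List (List Int)) (M : Int) (c : Int × Int) : Prop :=
  pvInB M c ∧ pvAt area c.1 c.2 ≠ 0

-- number of M×M cells not yet visited (termination measure for the inner loops)
def pvFree (M : Int) (V : List (Int × Int)) : Nat := ((pvCells M).toFinset \ V.toFinset).card

theorem mem_pvRng (M : Int) (i : Int) : i ∈ pvRng M ↔ 0 ≤ i ∧ i < M := by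
  unfold pvRng
  rw [PySem.List.mem_pyRange_one]

theorem mem_pvCells_iff (M : Int) (c : Int × Int) : c ∈ pvCells M ↔ pvInB M c := by
  obtain ⟨y, x⟩ := c
  simp only [pvCells, List.mem_flatMap, List.mem_map, pvInB, mem_pvRng]
  constructor
  · rintro ⟨i, hi, j, hj, h⟩
    obtain ⟨rfl, rfl⟩ : i = y ∧ j = x := by simpa [Prod.ext_iff] using h
    exact ⟨hi.1, hi.2, hj.1, hj.2⟩
  · rintro ⟨h1, h2, h3, h4⟩
    exact ⟨y, ⟨h1, h2⟩, x, ⟨h3, h4⟩, rfl⟩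

-- card of the unvisited cells drops by the number of fresh distinct cells added
theorem pvFree_drop (M : Int) (V new : List (Int × Int)) (h1 : new.Nodup)
    (h2 : ∀ e ∈ new, e ∈ pvCells M ∧ e ∉ V) :
    pvFree M (new ++ V) + new.length = pvFree M V := by
  unfold pvFree
  have hts : (new ++ V).toFinset = new.toFinset ∪ V.toFinset := by
    simp [List.toFinset_append]
  rw [hts]
  have hsd : (pvCells M).toFinset \ (new.toFinset ∪ V.toFinset)
      = ((pvCells M).toFinset \ V.toFinset) \ new.toFinset := by
    ext a; simp; tauto
  rw [hsd, Finset.card_sdiff]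
  have hsub : new.toFinset ⊆ (pvCells M).toFinset \ V.toFinset := by
    intro a ha
    simp only [List.mem_toFinset] at ha
    obtain ⟨h1, h2⟩ := h2 a ha
    simp [h1, h2]
  have hinter : new.toFinset ∩ ((pvCells M).toFinset \ V.toFinset) = new.toFinset :=
    Finset.inter_eq_left.2 hsub
  rw [hinter, List.toFinset_card_of_nodup h1]
  have := Finset.card_le_card hsub
  rw [List.toFinset_card_of_nodup h1] at this
  omega

-- ===== PORT A =====

-- one neighbour test/push of A's BFS inner loop; state (visited, queue, cnt, total);
-- A appends to the BACK of the deque and adds the cell's value to total on push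
def pvStepA (area : List (List Int)) (M : Int)
    (st : List (Int × Int) × List (Int × Int) × Int × Int) (e : Int × Int) :
    List (Int × Int) × List (Int × Int) × Int × Int :=
  if pvGood area M e ∧ e ∉ st.1 then
    (e :: st.1, st.2.1 ++ [e], st.2.2.1 + 1, st.2.2.2 + pvAt area e.1 e.2)
  else st

theorem pvFoldA_spec (area : List (List Int)) (M : Int) (ns : List (Int × Int)) :
    ∀ (V q : List (Int × Int)) (cnt tot : Int),
    ∃ new : List (Int × Int),
      ns.foldl (pvStepA area M) (V, q, cnt, tot)
        = (new.reverse ++ V, q ++ new, cnt + new.length,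
           tot + (new.map (fun e => pvAt area e.1 e.2)).sum) ∧
      new.Nodup ∧ (∀ e ∈ new, e ∈ ns ∧ pvGood area M e ∧ e ∉ V) ∧
      (∀ e ∈ ns, pvGood area M e → e ∈ new.reverse ++ V) := by
  induction ns with
  | nil => intro V q cnt tot; exact ⟨[], by simp, by simp, by simp, by simp⟩
  | cons n ns ih =>
    intro V q cnt tot
    simp only [List.foldl_cons]
    by_cases hc : pvGood area M n ∧ n ∉ V
    · have hst : pvStepA area M (V, q, cnt, tot) n
          = (n :: V, q ++ [n], cnt + 1, tot + pvAt area n.1 n.2) := by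
        simp [pvStepA, hc]
      rw [hst]
      obtain ⟨new, heq, hnd, hmem, hcl⟩ := ih (n :: V) (q ++ [n]) (cnt + 1) (tot + pvAt area n.1 n.2)
      refine ⟨n :: new, ?_, ?_, ?_, ?_⟩
      · rw [heq]
        refine Prod.ext ?_ (Prod.ext ?_ (Prod.ext ?_ ?_)) <;> simp <;> ring
      · exact List.nodup_cons.2 ⟨fun hn => ((hmem n hn).2.2 (by simp)), hnd⟩
      · intro e he
        rcases List.mem_cons.1 he with rfl | he'
        · exact ⟨by simp, hc.1, hc.2⟩
        · obtain ⟨h1, h2, h3⟩ := hmem e he'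
          refine ⟨by simp [h1], h2, fun hv => h3 (by simp [hv])⟩
      · intro e he hg
        rcases List.mem_cons.1 he with rfl | he'
        · simp
        · have := hcl e he' hg
          simp only [List.reverse_cons, List.append_assoc, List.mem_append] at this ⊢
          simpa [or_assoc, or_comm, or_left_comm] using this
    · have hst : pvStepA area M (V, q, cnt, tot) n = (V, q, cnt, tot) := by
        simp only [pvStepA, if_neg hc]
      rw [hst]
      obtain ⟨new, heq, hnd, hmem, hcl⟩ := ih V q cnt tot
      refine ⟨new, heq, hnd, ?_, ?_⟩
      · intro e he; obtain ⟨h1, h2, h3⟩ := hmem e he; exact ⟨by simp [h1], h2, h3⟩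
      · intro e he hg
        rcases List.mem_cons.1 he with rfl | he'
        · have hnV : e ∈ V := by by_contra hnV; exact hc ⟨hg, hnV⟩
          simp [hnV]
        · exact hcl e he' hg

-- A's BFS: pop from the FRONT of the queue (deque.popleft)
def bfsA (area : List (List Int)) (M : Int) (V q : List (Int × Int)) (cnt tot : Int) :
    List (Int × Int) × Int × Int :=
  match q with
  | [] => (V, cnt, tot)
  | c :: q' =>
    match h : (pvNbrs c).foldl (pvStepA area M) (V, q', cnt, tot) with
    | (V', q'', cnt', tot') => bfsA area M V' q'' cnt' tot'
termination_by 2 * pvFree M V + q.length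
decreasing_by
  obtain ⟨new, heq, hnd, hprop, -⟩ := pvFoldA_spec area M (pvNbrs c) V q' cnt tot
  rw [h] at heq
  have h1 : V' = new.reverse ++ V := congrArg Prod.fst heq
  have h2 : q'' = q' ++ new := congrArg (fun s => s.2.1) heq
  have hd := pvFree_drop M V new.reverse (List.nodup_reverse.2 hnd)
    (fun e he => ⟨(mem_pvCells_iff M e).2 (hprop e (List.mem_reverse.1 he)).2.1.1,
                  (hprop e (List.mem_reverse.1 he)).2.2⟩)
  subst h1 h2
  simp only [List.length_append, List.length_cons, List.length_reverse] at hd ⊢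
  omega

-- outer double loop body of A: seed an unvisited nonzero cell, run BFS, update max_cnt;
-- state (visited, max_cnt, total)
def pvOuterA (area : List (List Int)) (M : Int)
    (st : List (Int × Int) × Int × Int) (c : Int × Int) : List (Int × Int) × Int × Int :=
  if pvAt area c.1 c.2 ≠ 0 ∧ c ∉ st.1 then
    match bfsA area M (c :: st.1) [c] 1 (st.2.2 + pvAt area c.1 c.2) with
    | (V', cnt', tot') => (V', if cnt' > st.2.1 then cnt' else st.2.1, tot')
  else st

def find_sum_cnt (area : List (List Int)) (M : Int) : Int × Int :=
  match (pvCells M).foldl (pvOuterA area M) ([], 0, 0) with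
  | (_, maxc, tot) => (tot, maxc)

-- ===== PORT B =====

-- Source B's frontier set comprehension: collect the in-bounds nonzero neighbours of the
-- frontier that are not yet in comp, each fresh cell once (set semantics)
def pvCollect (area : List (List Int)) (M : Int) (comp : List (Int × Int))
    (acc : List (Int × Int)) (e : Int × Int) : List (Int × Int) :=
  if pvGood area M e ∧ e ∉ comp ∧ e ∉ acc then acc ++ [e] else acc

def pvGrow (area : List (List Int)) (M : Int) (comp frontier : List (Int × Int)) :
    List (Int × Int) :=
  frontier.foldl (fun acc c => (pvNbrs c).foldl (pvCollect area M comp) acc) []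

theorem pvCollect_fold (area : List (List Int)) (M : Int) (comp : List (Int × Int))
    (ns : List (Int × Int)) :
    ∀ acc : List (Int × Int), acc.Nodup → (∀ e ∈ acc, pvGood area M e ∧ e ∉ comp) →
    ∃ add : List (Int × Int),
      ns.foldl (pvCollect area M comp) acc = acc ++ add ∧ (acc ++ add).Nodup ∧
      (∀ e ∈ add, e ∈ ns ∧ pvGood area M e ∧ e ∉ comp) ∧
      (∀ e ∈ ns, pvGood area M e → e ∉ comp → e ∈ acc ++ add) := by
  induction ns with
  | nil => intro acc h1 h2; exact ⟨[], by simp, by simpa using h1, by simp, by simp⟩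
  | cons n ns ih =>
    intro acc h1 h2
    simp only [List.foldl_cons]
    by_cases hc : pvGood area M n ∧ n ∉ comp ∧ n ∉ acc
    · have hst : pvCollect area M comp acc n = acc ++ [n] := by
        simp [pvCollect, hc]
      rw [hst]
      have h1' : (acc ++ [n]).Nodup :=
        (List.perm_append_singleton n acc).symm.nodup (List.nodup_cons.2 ⟨hc.2.2, h1⟩)
      obtain ⟨add, heq, hnd, hmem, hcl⟩ := ih (acc ++ [n]) h1'
        (by intro e he
            rcases List.mem_append.1 he with he | he
            · exact h2 e he
            · simp only [List.mem_singleton] at he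
              exact he ▸ ⟨hc.1, hc.2.1⟩)
      refine ⟨n :: add, by simpa using heq, by simpa using hnd, ?_, ?_⟩
      · intro e he
        rcases List.mem_cons.1 he with rfl | he'
        · exact ⟨by simp, hc.1, hc.2.1⟩
        · obtain ⟨ha, hb, hcc⟩ := hmem e he'
          exact ⟨by simp [ha], hb, hcc⟩
      · intro e he hg hnc
        rcases List.mem_cons.1 he with rfl | he'
        · simp
        · have := hcl e he' hg hnc
          simpa [List.append_assoc] using this
    · have hst : pvCollect area M comp acc n = acc := by
        simp only [pvCollect, if_neg hc]
      rw [hst]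
      obtain ⟨add, heq, hnd, hmem, hcl⟩ := ih acc h1 h2
      refine ⟨add, heq, hnd, ?_, ?_⟩
      · intro e he; obtain ⟨ha, hb, hcc⟩ := hmem e he; exact ⟨by simp [ha], hb, hcc⟩
      · intro e he hg hnc
        rcases List.mem_cons.1 he with rfl | he'
        · have heacc : e ∈ acc := by
            by_contra hx; exact hc ⟨hg, hnc, hx⟩
          exact List.mem_append_left _ heacc
        · exact hcl e he' hg hnc

theorem pvGrow_spec (area : List (List Int)) (M : Int) (comp : List (Int × Int)) :
    ∀ frontier : List (Int × Int),
    ∃ new : List (Int × Int),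
      pvGrow area M comp frontier = new ∧ new.Nodup ∧
      (∀ e ∈ new, pvGood area M e ∧ e ∉ comp ∧ ∃ c ∈ frontier, e ∈ pvNbrs c) ∧
      (∀ c ∈ frontier, ∀ e ∈ pvNbrs c, pvGood area M e → e ∉ comp → e ∈ new) := by
  suffices h : ∀ (fr acc : List (Int × Int)), acc.Nodup →
      (∀ e ∈ acc, pvGood area M e ∧ e ∉ comp) →
      ∃ add : List (Int × Int),
        fr.foldl (fun acc c => (pvNbrs c).foldl (pvCollect area M comp) acc) acc
          = acc ++ add ∧ (acc ++ add).Nodup ∧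
        (∀ e ∈ add, pvGood area M e ∧ e ∉ comp ∧ ∃ c ∈ fr, e ∈ pvNbrs c) ∧
        (∀ c ∈ fr, ∀ e ∈ pvNbrs c, pvGood area M e → e ∉ comp → e ∈ acc ++ add) by
    intro frontier
    obtain ⟨add, heq, hnd, hmem, hcl⟩ := h frontier [] (by simp) (by simp)
    exact ⟨add, by simpa [pvGrow] using heq, by simpa using hnd, hmem,
      by simpa using hcl⟩
  intro fr
  induction fr with
  | nil => intro acc h1 h2; exact ⟨[], by simp, by simpa using h1, by simp, by simp⟩
  | cons c fr ih =>
    intro acc h1 h2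
    simp only [List.foldl_cons]
    obtain ⟨add1, heq1, hnd1, hmem1, hcl1⟩ := pvCollect_fold area M comp (pvNbrs c) acc h1 h2
    rw [heq1]
    obtain ⟨add2, heq2, hnd2, hmem2, hcl2⟩ := ih (acc ++ add1) hnd1
      (fun e he => by
        rcases List.mem_append.1 he with he | he
        · exact h2 e he
        · exact ⟨(hmem1 e he).2.1, (hmem1 e he).2.2⟩)
    refine ⟨add1 ++ add2, by simpa [List.append_assoc] using heq2,
      by simpa [List.append_assoc] using hnd2, ?_, ?_⟩
    · intro e he
      rcases List.mem_append.1 he with he | he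
      · obtain ⟨ha, hb, hcc⟩ := hmem1 e he
        exact ⟨hb, hcc, c, by simp, ha⟩
      · obtain ⟨ha, hb, ⟨c', hc', he'⟩⟩ := hmem2 e he
        exact ⟨ha, hb, c', by simp [hc'], he'⟩
    · intro c' hc' e he hg hnc
      rcases List.mem_cons.1 hc' with rfl | hc''
      · rcases List.mem_append.1 (hcl1 e he hg hnc) with h | h
        · exact List.mem_append_left _ h
        · exact List.mem_append_right _ (List.mem_append_left _ h)
      · rcases List.mem_append.1 (hcl2 c' hc'' e he hg hnc) with h | h
        · rcases List.mem_append.1 h with h' | h'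
          · exact List.mem_append_left _ h'
          · exact List.mem_append_right _ (List.mem_append_left _ h')
        · exact List.mem_append_right _ (List.mem_append_right _ h)

-- Source B's while loop: saturate comp by level-synchronous frontier expansion
def pvExpand (area : List (List Int)) (M : Int) (comp frontier : List (Int × Int)) :
    List (Int × Int) :=
  match frontier with
  | [] => comp
  | c :: fr =>
    let new := pvGrow area M comp (c :: fr)
    pvExpand area M (new ++ comp) new
termination_by pvFree M comp + frontier.length
decreasing_by
  obtain ⟨new', heq, hnd, hmem, -⟩ := pvGrow_spec area M comp (c :: fr)
  have hd := pvFree_drop M comp new' hnd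
    (fun e he => ⟨(mem_pvCells_iff M e).2 (hmem e he).1.1, (hmem e he).2.1⟩)
  rw [heq]
  simp only [List.length_cons]
  omega

-- outer double loop body of B: seed an unseen nonzero cell, saturate its component,
-- record all of it as seen and keep the best size; state (seen, max_cnt)
def pvOuterB (area : List (List Int)) (M : Int)
    (st : List (Int × Int) × Int) (c : Int × Int) : List (Int × Int) × Int :=
  if pvAt area c.1 c.2 ≠ 0 ∧ c ∉ st.1 then
    let comp := pvExpand area M [c] [c]
    (comp ++ st.1, max st.2 (comp.length : Int))
  else st

def find_sum_cnt_alt (area : List (List Int)) (M : Int) : Int × Int :=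
  -- total = sum(area[i][j] for i in range(M) for j in range(M)), a closed-form sum
  (((pvRng M).map (fun i => ((pvRng M).map (fun j => pvAt area i j)).sum)).sum,
   ((pvRng M).foldl (fun st i =>
      (pvRng M).foldl (fun st j => pvOuterB area M st (i, j)) st) ([], 0)).2)

-- ===== PRECONDITION & SPEC =====

-- Pre_ excludes exactly the inputs on which the Python A raises IndexError:
-- it reads area[i][j] for all 0 ≤ i, j < M, so the first M rows must exist and
-- each must have at least M entries.
def Pre_find_sum_cnt (area : List (List Int)) (M : Int) : Prop :=
  M ≤ (area.length : Int) ∧ ∀ row ∈ area.take M.toNat, M ≤ (row.length : Int)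
instance (area : List (List Int)) (M : Int) : Decidable (Pre_find_sum_cnt area M) := by
  unfold Pre_find_sum_cnt; infer_instance

def pvWitness_find_sum_cnt : List (List Int) × Int := ([[1, 0, 2], [0, 3, 0], [4, 0, 5]], 3)

def Spec_find_sum_cnt (area : List (List Int)) (M : Int) (out : Int × Int) : Prop := out = find_sum_cnt_alt area M
instance (area : List (List Int)) (M : Int) (out : Int × Int) : Decidable (Spec_find_sum_cnt area M out) := by unfold Spec_find_sum_cnt; infer_instance

-- ===== CLAIM (what is proved, stated in full; the proofs are below) =====
def Claim_equal_find_sum_cnt : Prop := ∀ (area : List (List Int)) (M : Int), Dom_find_sum_cnt area M → Pre_find_sum_cnt area M → Spec_find_sum_cnt area M (find_sum_cnt area M)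

-- ===== LEMMAS AND PROOFS =====

-- value of a cell, abbreviation used throughout the proofs
abbrev pvG (area : List (List Int)) (c : Int × Int) : Int := pvAt area c.1 c.2

-- the 4-neighbourhood is symmetric
theorem pvNbrs_symm (v e : Int × Int) : e ∈ pvNbrs v ↔ v ∈ pvNbrs e := by
  obtain ⟨a, b⟩ := v; obtain ⟨x, y⟩ := e
  simp only [pvNbrs, List.mem_cons, List.not_mem_nil, or_false, Prod.mk.injEq]
  constructor <;> (rintro (⟨h1, h2⟩ | ⟨h1, h2⟩ | ⟨h1, h2⟩ | ⟨h1, h2⟩) <;> subst h1 <;> subst h2)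
  all_goals simp

-- ---- characterisation of A's BFS inner loop ----
theorem bfsA_spec (area : List (List Int)) (M : Int) :
    ∀ (V q : List (Int × Int)) (cnt tot : Int),
    V.Nodup → (∀ c ∈ q, c ∈ V) →
    (∀ v ∈ V, v ∉ q → ∀ e ∈ pvNbrs v, pvGood area M e → e ∈ V) →
    ∃ X : List (Int × Int),
      bfsA area M V q cnt tot
        = (X ++ V, cnt + X.length, tot + (X.map (pvG area)).sum) ∧
      (X ++ V).Nodup ∧ (∀ e ∈ X, pvGood area M e) ∧
      (∀ v ∈ X ++ V, ∀ e ∈ pvNbrs v, pvGood area M e → e ∈ X ++ V) ∧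
      (∀ T : (Int × Int) → Prop, (∀ x ∈ V, T x) →
        (∀ v, T v → ∀ e ∈ pvNbrs v, pvGood area M e → T e) → ∀ x ∈ X, T x) := by
  intro V q cnt tot
  induction V, q, cnt, tot using bfsA.induct area M with
  | case1 V cnt tot =>
    intro hV hq hcl
    refine ⟨[], by simp [bfsA], by simpa using hV, by simp, ?_, by simp⟩
    simpa using fun v hv e he hg => hcl v hv (by simp) e he hg
  | case2 V cnt tot c q' V' q'' cnt' tot' h ih =>
    intro hV hq hcl
    have hstep : bfsA area M V (c :: q') cnt tot = bfsA area M V' q'' cnt' tot' := by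
      rw [bfsA, h]
    obtain ⟨new, heq, hnd, hmem, hcls⟩ := pvFoldA_spec area M (pvNbrs c) V q' cnt tot
    rw [h] at heq
    have e1 : V' = new.reverse ++ V := congrArg Prod.fst heq
    have e2 : q'' = q' ++ new := congrArg (fun s => s.2.1) heq
    have e3 : cnt' = cnt + new.length := congrArg (fun s => s.2.2.1) heq
    have e4 : tot' = tot + (new.map (fun e => pvAt area e.1 e.2)).sum := congrArg (fun s => s.2.2.2) heq
    subst e1 e2 e3 e4
    have hcV : c ∈ V := hq c (by simp)
    have hV' : (new.reverse ++ V).Nodup := by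
      refine List.nodup_append.2 ⟨List.nodup_reverse.2 hnd, hV, ?_⟩
      intro a ha b hb hab
      exact (hmem a (List.mem_reverse.1 ha)).2.2 (hab ▸ hb)
    have hq' : ∀ x ∈ q' ++ new, x ∈ new.reverse ++ V := by
      intro x hx
      rcases List.mem_append.1 hx with hx | hx
      · exact List.mem_append_right _ (hq x (by simp [hx]))
      · exact List.mem_append_left _ (List.mem_reverse.2 hx)
    have hcl' : ∀ v ∈ new.reverse ++ V, v ∉ q' ++ new →
        ∀ e ∈ pvNbrs v, pvGood area M e → e ∈ new.reverse ++ V := by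
      intro v hv hvq e he hg
      rcases List.mem_append.1 hv with hv | hv
      · exact absurd (List.mem_append_right _ (List.mem_reverse.1 hv)) hvq
      · by_cases hvc : v = c
        · exact hcls e (hvc ▸ he) hg
        · have hvq' : v ∉ c :: q' := by
            simp only [List.mem_cons, not_or]
            exact ⟨hvc, fun hh => hvq (List.mem_append_left _ hh)⟩
          exact List.mem_append_right _ (hcl v hv hvq' e he hg)
    obtain ⟨X, heqX, hndX, hgX, hclX, hminX⟩ := ih hV' hq' hcl'
    refine ⟨X ++ new.reverse, ?_, ?_, ?_, ?_, ?_⟩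
    · rw [hstep, heqX]
      refine Prod.ext ?_ (Prod.ext ?_ ?_)
      · simp [List.append_assoc]
      · simp only [List.length_append, List.length_reverse]
        push_cast
        ring
      · simp only []
        simp [List.map_append, List.sum_append, List.map_reverse, List.sum_reverse]
        ring
    · simpa [List.append_assoc] using hndX
    · intro e he
      rcases List.mem_append.1 he with he | he
      · exact hgX e he
      · exact (hmem e (List.mem_reverse.1 he)).2.1
    · intro v hv e he hg
      have := hclX v (by simpa [List.append_assoc] using hv) e he hg
      simpa [List.append_assoc] using this
    · intro T hTV hTc x hx
      have hTnew : ∀ e ∈ new, T e :=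
        fun e hen => hTc c (hTV c hcV) e (hmem e hen).1 (hmem e hen).2.1
      rcases List.mem_append.1 hx with hx | hx
      · refine hminX T ?_ hTc x hx
        intro y hy
        rcases List.mem_append.1 hy with hy | hy
        · exact hTnew y (List.mem_reverse.1 hy)
        · exact hTV y hy
      · exact hTnew x (List.mem_reverse.1 hx)

-- ---- characterisation of B's frontier saturation ----
theorem pvExpand_spec (area : List (List Int)) (M : Int) :
    ∀ (comp frontier : List (Int × Int)),
    comp.Nodup → (∀ c ∈ frontier, c ∈ comp) → (∀ x ∈ comp, pvGood area M x) →
    (∀ v ∈ comp, v ∉ frontier → ∀ e ∈ pvNbrs v, pvGood area M e → e ∈ comp) →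
    ∃ X : List (Int × Int),
      pvExpand area M comp frontier = X ++ comp ∧
      (X ++ comp).Nodup ∧ (∀ e ∈ X, pvGood area M e) ∧
      (∀ v ∈ X ++ comp, ∀ e ∈ pvNbrs v, pvGood area M e → e ∈ X ++ comp) ∧
      (∀ T : (Int × Int) → Prop, (∀ x ∈ comp, T x) →
        (∀ v, T v → ∀ e ∈ pvNbrs v, pvGood area M e → T e) → ∀ x ∈ X, T x) := by
  intro comp frontier
  induction comp, frontier using pvExpand.induct area M with
  | case1 comp =>
    intro hnd _ hgood hcl
    refine ⟨[], by simp [pvExpand], by simpa using hnd, by simp, ?_, by simp⟩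
    simpa using fun v hv e he hg => hcl v hv (by simp) e he hg
  | case2 comp c fr nw ih =>
    intro hnd hfr hgood hcl
    obtain ⟨new, heq, hndn, hmem, hcls⟩ := pvGrow_spec area M comp (c :: fr)
    have hnw : nw = pvGrow area M comp (c :: fr) := rfl
    simp only [hnw, heq] at ih
    have hstep : pvExpand area M comp (c :: fr) = pvExpand area M (new ++ comp) new := by
      rw [pvExpand]
      simp only [heq]
    have hnd' : (new ++ comp).Nodup := by
      refine List.nodup_append.2 ⟨hndn, hnd, ?_⟩
      intro a ha b hb hab
      exact (hmem a ha).2.1 (hab ▸ hb)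
    have hfr' : ∀ x ∈ new, x ∈ new ++ comp := fun x hx => List.mem_append_left _ hx
    have hgood' : ∀ x ∈ new ++ comp, pvGood area M x := by
      intro x hx
      rcases List.mem_append.1 hx with hx | hx
      · exact (hmem x hx).1
      · exact hgood x hx
    have hcl' : ∀ v ∈ new ++ comp, v ∉ new →
        ∀ e ∈ pvNbrs v, pvGood area M e → e ∈ new ++ comp := by
      intro v hv hvn e he hg
      rcases List.mem_append.1 hv with hv | hv
      · exact absurd hv hvn
      · by_cases hvf : v ∈ c :: fr
        · by_cases hec : e ∈ comp
          · exact List.mem_append_right _ hec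
          · exact List.mem_append_left _ (hcls v hvf e he hg hec)
        · exact List.mem_append_right _ (hcl v hv hvf e he hg)
    obtain ⟨X, heqX, hndX, hgX, hclX, hminX⟩ := ih hnd' hfr' hgood' hcl'
    refine ⟨X ++ new, ?_, ?_, ?_, ?_, ?_⟩
    · rw [hstep, heqX, List.append_assoc]
    · simpa [List.append_assoc] using hndX
    · intro e he
      rcases List.mem_append.1 he with he | he
      · exact hgX e he
      · exact (hmem e he).1
    · intro v hv e he hg
      have := hclX v (by simpa [List.append_assoc] using hv) e he hg
      simpa [List.append_assoc] using this
    · intro T hTc hTstep x hx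
      have hTnew : ∀ e ∈ new, T e := by
        intro e hen
        obtain ⟨c', hc', he'⟩ := (hmem e hen).2.2
        exact hTstep c' (hTc c' (hfr c' hc')) e he' (hmem e hen).1
      rcases List.mem_append.1 hx with hx | hx
      · refine hminX T ?_ hTstep x hx
        intro y hy
        rcases List.mem_append.1 hy with hy | hy
        · exact hTnew y hy
        · exact hTc y hy
      · exact hTnew x hx

-- ---- the two ports discover the same component at each seed ----
-- Given A's visited set V (nodup, all good, neighbour-closed) and a good unvisited seed c,
-- A's BFS layer X and B's saturated component R = pvExpand [c] [c] satisfy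
--   R = X ∪ {c}  (as sets)  and  |R| = |X| + 1.
theorem pvComp_eq (area : List (List Int)) (M : Int) (V X : List (Int × Int)) (c : Int × Int)
    (hVcl : ∀ v ∈ V, ∀ e ∈ pvNbrs v, pvGood area M e → e ∈ V)
    (hgc : pvGood area M c) (hcV : c ∉ V)
    (hndX : (X ++ c :: V).Nodup) (hgX : ∀ e ∈ X, pvGood area M e)
    (hclX : ∀ v ∈ X ++ c :: V, ∀ e ∈ pvNbrs v, pvGood area M e → e ∈ X ++ c :: V)
    (hminX : ∀ T : (Int × Int) → Prop, (∀ x ∈ c :: V, T x) →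
      (∀ v, T v → ∀ e ∈ pvNbrs v, pvGood area M e → T e) → ∀ x ∈ X, T x) :
    (∀ x, x ∈ pvExpand area M [c] [c] ↔ x ∈ X ++ [c]) ∧
    ((pvExpand area M [c] [c]).length : Int) = (X.length : Int) + 1 := by
  obtain ⟨R, heqR, hndR, -, hclR, hminR⟩ :=
    pvExpand_spec area M [c] [c] (by simp) (by simp) (by simpa using hgc)
      (by intro v hv hvf; simp at hv hvf; exact absurd hv hvf)
  have hXV : ∀ x ∈ X, x ∉ V := fun x hx hxV =>
    (List.disjoint_of_nodup_append hndX) hx (List.mem_cons_of_mem _ hxV)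
  have hXc : c ∉ X := fun hc =>
    (List.disjoint_of_nodup_append hndX) hc (by simp)
  -- R ⊆ X ∪ {c}
  have hRsub : ∀ x ∈ pvExpand area M [c] [c], x ∈ X ++ [c] := by
    rw [heqR]
    intro x hx
    have hT : ∀ y ∈ R ++ [c], pvGood area M y ∧ y ∈ X ++ [c] := by
      intro y hy
      rcases List.mem_append.1 hy with hy | hy
      · refine (fun h => h) ?_
        refine hminR (fun z => pvGood area M z ∧ z ∈ X ++ [c]) ?_ ?_ y hy
        · intro z hz; simp at hz; subst hz; exact ⟨hgc, by simp⟩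
        · rintro v ⟨hvg, hvX⟩ e he hg
          refine ⟨hg, ?_⟩
          have hvXV : v ∈ X ++ c :: V := by
            rcases List.mem_append.1 hvX with h | h
            · exact List.mem_append_left _ h
            · simp at h; subst h; exact List.mem_append_right _ (by simp)
          have heXV := hclX v hvXV e he hg
          rcases List.mem_append.1 heXV with h | h
          · exact List.mem_append_left _ h
          · rcases List.mem_cons.1 h with rfl | hV'
            · exact List.mem_append_right _ (by simp)
            · -- e ∈ V would pull v into V by V-closure and symmetry, contradiction
              exfalso
              have hvV : v ∈ V := hVcl e hV' v ((pvNbrs_symm v e).1 he) hvg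
              rcases List.mem_append.1 hvX with h' | h'
              · exact hXV v h' hvV
              · simp at h'; subst h'; exact hcV hvV
      · simp at hy; subst hy; exact ⟨hgc, by simp⟩
    exact (hT x hx).2
  -- X ∪ {c} ⊆ R
  have hXsub : ∀ x ∈ X ++ [c], x ∈ pvExpand area M [c] [c] := by
    rw [heqR]
    intro x hx
    rcases List.mem_append.1 hx with hx | hx
    · have hXRV : ∀ y ∈ X, y ∈ R ++ [c] ∨ y ∈ V := by
        refine hminX (fun z => z ∈ R ++ [c] ∨ z ∈ V) ?_ ?_
        · intro z hz
          rcases List.mem_cons.1 hz with rfl | hz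
          · exact Or.inl (List.mem_append_right _ (by simp))
          · exact Or.inr hz
        · rintro v (hv | hv) e he hg
          · exact Or.inl (hclR v hv e he hg)
          · exact Or.inr (hVcl v hv e he hg)
      rcases hXRV x hx with h | h
      · exact h
      · exact absurd h (hXV x hx)
    · simp at hx; subst hx
      exact List.mem_append_right _ (by simp)
  refine ⟨fun x => ⟨hRsub x, hXsub x⟩, ?_⟩
  have hndXc : (X ++ [c]).Nodup :=
    (List.perm_append_singleton c X).symm.nodup
      (List.nodup_cons.2 ⟨hXc, (List.nodup_append.1 hndX).1⟩)
  have hndR' : (pvExpand area M [c] [c]).Nodup := by rw [heqR]; exact hndR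
  have hperm : List.Perm (pvExpand area M [c] [c]) (X ++ [c]) :=
    (List.perm_ext_iff_of_nodup hndR' hndXc).2 (fun x => ⟨hRsub x, hXsub x⟩)
  have := hperm.length_eq
  simp only [List.length_append, List.length_singleton] at this
  omega

-- ---- invariant tying the two outer folds together ----
def pvRel (area : List (List Int)) (M : Int)
    (sA : List (Int × Int) × Int × Int) (sB : List (Int × Int) × Int) : Prop :=
  sA.1.Nodup ∧ sB.1.Nodup ∧ (∀ x, x ∈ sA.1 ↔ x ∈ sB.1) ∧ sA.2.1 = sB.2 ∧
  sA.2.2 = (sA.1.map (pvG area)).sum ∧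
  (∀ v ∈ sA.1, pvGood area M v) ∧
  (∀ v ∈ sA.1, ∀ e ∈ pvNbrs v, pvGood area M e → e ∈ sA.1)

theorem pvOuter_rel (area : List (List Int)) (M : Int) :
    ∀ l : List (Int × Int), (∀ c ∈ l, pvInB M c) →
    ∀ sA sB, pvRel area M sA sB →
    pvRel area M (l.foldl (pvOuterA area M) sA) (l.foldl (pvOuterB area M) sB) ∧
    (∀ c ∈ l, pvGood area M c → c ∈ (l.foldl (pvOuterA area M) sA).1) ∧
    (∀ x ∈ sA.1, x ∈ (l.foldl (pvOuterA area M) sA).1) := by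
  intro l
  induction l with
  | nil =>
    intro _ sA sB hrel
    exact ⟨hrel, by simp, by simp⟩
  | cons c l ih =>
    intro hB sA sB hrel
    obtain ⟨VA, maxA, totA⟩ := sA
    obtain ⟨VB, maxB⟩ := sB
    obtain ⟨sA1nd, sB1nd, hmemAB, hmax, htot, hgood, hclosed⟩ := hrel
    simp only at sA1nd sB1nd hmemAB hmax htot hgood hclosed
    have hcB : pvInB M c := hB c (by simp)
    have hBl : ∀ x ∈ l, pvInB M x := fun x hx => hB x (by simp [hx])
    simp only [List.foldl_cons]
    by_cases hcond : pvAt area c.1 c.2 ≠ 0 ∧ c ∉ VA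
    · -- the cell seeds a new component in both programs
      have hcondB : pvAt area c.1 c.2 ≠ 0 ∧ c ∉ VB :=
        ⟨hcond.1, fun h => hcond.2 ((hmemAB c).2 h)⟩
      have hgc : pvGood area M c := ⟨hcB, hcond.1⟩
      have hVAnd : (c :: VA).Nodup := List.nodup_cons.2 ⟨hcond.2, sA1nd⟩
      have hclseedA : ∀ v ∈ c :: VA, v ∉ [c] →
          ∀ e ∈ pvNbrs v, pvGood area M e → e ∈ c :: VA := by
        intro v hv hvq e he hg
        rcases List.mem_cons.1 hv with rfl | hv
        · exact absurd (by simp) hvq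
        · exact List.mem_cons_of_mem _ (hclosed v hv e he hg)
      obtain ⟨XA, heqA, hndA, hgA, hclA, hminA⟩ :=
        bfsA_spec area M (c :: VA) [c] 1 (totA + pvAt area c.1 c.2) hVAnd (by simp) hclseedA
      obtain ⟨hRmem, hRlen⟩ := pvComp_eq area M VA XA c hclosed hgc hcond.2 hndA hgA hclA hminA
      have houtA : pvOuterA area M (VA, maxA, totA) c
          = (XA ++ c :: VA,
             if (1 + (XA.length : Int)) > maxA then 1 + (XA.length : Int) else maxA,
             (totA + pvAt area c.1 c.2) + (XA.map (pvG area)).sum) := by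
        simp only [pvOuterA, if_pos hcond]
        rw [heqA]
      have houtB : pvOuterB area M (VB, maxB) c
          = (pvExpand area M [c] [c] ++ VB,
             max maxB ((pvExpand area M [c] [c]).length : Int)) := by
        simp only [pvOuterB, if_pos hcondB]
      have hmax' : (if (1 + (XA.length : Int)) > maxA then 1 + (XA.length : Int) else maxA)
          = max maxB ((pvExpand area M [c] [c]).length : Int) := by
        rw [hRlen, hmax, Int.max_def]
        split_ifs <;> omega
      -- new B visited set is nodup: R is disjoint from VB
      have hRdisj : ∀ x ∈ pvExpand area M [c] [c], x ∉ VB := by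
        intro x hx hxB
        have hxA : x ∈ VA := (hmemAB x).2 hxB
        rcases List.mem_append.1 ((hRmem x).1 hx) with h | h
        · exact (List.disjoint_of_nodup_append hndA) h (List.mem_cons_of_mem _ hxA)
        · simp at h; subst h; exact hcond.2 hxA
      have hndR : (pvExpand area M [c] [c]).Nodup := by
        obtain ⟨R, heqR, hndR, -, -, -⟩ :=
          pvExpand_spec area M [c] [c] (by simp) (by simp) (by simpa using hgc)
            (by intro v hv hvf; simp at hv hvf; exact absurd hv hvf)
        rw [heqR]; exact hndR
      have hndB' : (pvExpand area M [c] [c] ++ VB).Nodup :=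
        List.nodup_append.2 ⟨hndR, sB1nd, fun a ha b hb hab => hRdisj a ha (hab ▸ hb)⟩
      have hmemAB' : ∀ x, x ∈ XA ++ c :: VA ↔ x ∈ pvExpand area M [c] [c] ++ VB := by
        intro x
        constructor
        · intro hx
          rcases List.mem_append.1 hx with hx | hx
          · exact List.mem_append_left _ ((hRmem x).2 (List.mem_append_left _ hx))
          · rcases List.mem_cons.1 hx with rfl | hx
            · exact List.mem_append_left _ ((hRmem x).2 (List.mem_append_right _ (by simp)))
            · exact List.mem_append_right _ ((hmemAB x).1 hx)
        · intro hx
          rcases List.mem_append.1 hx with hx | hx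
          · rcases List.mem_append.1 ((hRmem x).1 hx) with h | h
            · exact List.mem_append_left _ h
            · simp at h; subst h; exact List.mem_append_right _ (by simp)
          · exact List.mem_append_right _ (List.mem_cons_of_mem _ ((hmemAB x).2 hx))
      have hrel' : pvRel area M
          (XA ++ c :: VA,
           (if (1 + (XA.length : Int)) > maxA then 1 + (XA.length : Int) else maxA),
           (totA + pvAt area c.1 c.2) + (XA.map (pvG area)).sum)
          (pvExpand area M [c] [c] ++ VB,
           max maxB ((pvExpand area M [c] [c]).length : Int)) := by
        refine ⟨hndA, hndB', hmemAB', hmax', ?_, ?_, hclA⟩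
        · simp only [List.map_append, List.sum_append, List.map_cons, List.sum_cons, htot]
          ring
        · intro v hv
          rcases List.mem_append.1 hv with hv | hv
          · exact hgA v hv
          · rcases List.mem_cons.1 hv with rfl | hv
            · exact hgc
            · exact hgood v hv
      obtain ⟨ih1, ih2, ih3⟩ := ih hBl _ _ hrel'
      rw [houtA, houtB]
      refine ⟨ih1, ?_, ?_⟩
      · intro c' hc' hgc'
        rcases List.mem_cons.1 hc' with rfl | hc'
        · exact ih3 c' (List.mem_append_right _ (by simp))
        · exact ih2 c' hc' hgc'
      · intro x hx
        exact ih3 x (List.mem_append_right _ (List.mem_cons_of_mem _ hx))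
    · -- the cell is zero or already visited in both programs
      have hcondB : ¬(pvAt area c.1 c.2 ≠ 0 ∧ c ∉ VB) :=
        fun hc' => hcond ⟨hc'.1, fun h => hc'.2 ((hmemAB c).1 h)⟩
      have houtA : pvOuterA area M (VA, maxA, totA) c = (VA, maxA, totA) := by
        simp only [pvOuterA, if_neg hcond]
      have houtB : pvOuterB area M (VB, maxB) c = (VB, maxB) := by
        simp only [pvOuterB, if_neg hcondB]
      rw [houtA, houtB]
      obtain ⟨ih1, ih2, ih3⟩ := ih hBl (VA, maxA, totA) (VB, maxB)
        ⟨sA1nd, sB1nd, hmemAB, hmax, htot, hgood, hclosed⟩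
      refine ⟨ih1, ?_, ih3⟩
      intro c' hc' hgc'
      rcases List.mem_cons.1 hc' with rfl | hc'
      · have hcV : c' ∈ VA := by
          by_contra hcV
          exact hcond ⟨hgc'.2, hcV⟩
        exact ih3 c' hcV
      · exact ih2 c' hc' hgc'

theorem pvRng_nodup (M : Int) : (pvRng M).Nodup := PySem.List.nodup_pyRange_one 0 M

theorem pvCells_nodup (M : Int) : (pvCells M).Nodup := by
  have : pvCells M = (pvRng M) ×ˢ (pvRng M) := rfl
  rw [this]
  exact (pvRng_nodup M).product (pvRng_nodup M)

theorem pvSum_rows (area : List (List Int)) (l r : List Int) :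
    ((l.flatMap (fun i => r.map (fun j => (i, j)))).map (pvG area)).sum
      = (l.map (fun i => (r.map (fun j => pvAt area i j)).sum)).sum := by
  induction l with
  | nil => simp
  | cons i l ih => simp [ih, List.map_map, Function.comp_def]

theorem pvSum_cells (area : List (List Int)) (M : Int) :
    ((pvCells M).map (pvG area)).sum
      = ((pvRng M).map (fun i => ((pvRng M).map (fun j => pvAt area i j)).sum)).sum :=
  pvSum_rows area (pvRng M) (pvRng M)

-- zero cells contribute nothing to the sum, so summing the nonzero cells is summing all cells
theorem pvSum_filter (area : List (List Int)) (L : List (Int × Int)) :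
    ((L.filter (fun c => decide (pvAt area c.1 c.2 ≠ 0))).map (pvG area)).sum
      = (L.map (pvG area)).sum := by
  simp only [decide_not]
  induction L with
  | nil => simp
  | cons a L ih =>
    by_cases h : pvAt area a.1 a.2 = 0
    · simp [h, ih]
    · simp [h, ih]

-- B's nested fold over range(M) × range(M) is the fold over the flattened cell list
theorem pvFoldl_flatMap {α β γ : Type} (l : List α) (f : α → List β)
    (g : γ → β → γ) (init : γ) :
    (l.flatMap f).foldl g init = l.foldl (fun acc a => (f a).foldl g acc) init := by
  induction l generalizing init with
  | nil => simp
  | cons a l ih => simp [List.foldl_append, ih]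

theorem pvAlt_outer (area : List (List Int)) (M : Int) :
    (pvRng M).foldl (fun st i =>
        (pvRng M).foldl (fun st j => pvOuterB area M st (i, j)) st) ([], 0)
      = (pvCells M).foldl (pvOuterB area M) ([], 0) := by
  rw [pvCells, pvFoldl_flatMap]
  simp only [List.foldl_map]

-- ===== VERDICT (by name: the statement is the Claim_ definition above) =====
theorem find_sum_cnt_spec : Claim_equal_find_sum_cnt := by
  unfold Claim_equal_find_sum_cnt
  intro area M _ _
  unfold Spec_find_sum_cnt
  have hinit : pvRel area M ([], 0, 0) ([], 0) :=
    ⟨by simp, by simp, by simp, rfl, by simp, by simp, by simp⟩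
  obtain ⟨hrel, hcov, hmono⟩ := pvOuter_rel area M (pvCells M)
    (fun c hc => (mem_pvCells_iff M c).1 hc) ([], 0, 0) ([], 0) hinit
  obtain ⟨hAnd, hBnd, hmemAB, hmax, htot, hgood, hclosed⟩ := hrel
  have hA : find_sum_cnt area M
      = (((pvCells M).foldl (pvOuterA area M) ([], 0, 0)).2.2,
         ((pvCells M).foldl (pvOuterA area M) ([], 0, 0)).2.1) := rfl
  have hB : find_sum_cnt_alt area M
      = (((pvRng M).map (fun i => ((pvRng M).map (fun j => pvAt area i j)).sum)).sum,
         ((pvRng M).foldl (fun st i =>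
            (pvRng M).foldl (fun st j => pvOuterB area M st (i, j)) st) ([], 0)).2) := rfl
  rw [hA, hB, pvAlt_outer]
  refine Prod.ext ?_ hmax
  -- the accumulated total equals the sum over the visited cells, which are exactly
  -- the nonzero cells of the M×M subgrid
  rw [htot]
  have hF : ∀ x, x ∈ ((pvCells M).foldl (pvOuterA area M) ([], 0, 0)).1
      ↔ x ∈ (pvCells M).filter (fun c => decide (pvAt area c.1 c.2 ≠ 0)) := by
    intro x
    rw [List.mem_filter]
    constructor
    · intro hx
      have hg := hgood x hx
      exact ⟨(mem_pvCells_iff M x).2 hg.1, by simpa using hg.2⟩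
    · rintro ⟨hx, hnz⟩
      exact hcov x hx ⟨(mem_pvCells_iff M x).1 hx, by simpa using hnz⟩
  have hFnd : ((pvCells M).filter (fun c => decide (pvAt area c.1 c.2 ≠ 0))).Nodup :=
    (pvCells_nodup M).filter _
  have hperm := (List.perm_ext_iff_of_nodup hAnd hFnd).2 hF
  rw [(hperm.map (pvG area)).sum_eq, pvSum_filter, pvSum_cells]
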